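-- pv_equiv track=rewrite | github.com/samuel-co/clustering-algorithms | ACO.py | DFS
-- ===== SOURCE A (Python) =====
-- def DFS(graph, visited, position, dimensions, search_radius):
--     ''' Find all of the data points lieing within our search radius on the grid. Utilizes Depth First Search
--         to recursively find all the neighboring neighbors in order to create the island. Returns the completed
--         island. '''
--
--     # create an array of neighboring points to the passed in point
--     neighbors = []
--     # loop through all positions within our search radius
--     for x in range(position[0] - search_radius, position[0] + search_radius + 1):
--         for y in range(position[1] - search_radius, position[1] + search_radius + 1):
--             # if the position is valid and there's and it hasnt been visited, mark it as True
--             if x in range(dimensions+1) and y in range(dimensions+1) and [x, y] != position and visited[x][y] is not True: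
--                 visited[x][y] = True
--                 # if the position has a point in it, add it and its neighbors to our neighbors
--                 if graph[x][y] == 1:
--                     neighbors.append([x, y])
--                     neighbors += DFS(graph, visited, [x, y], dimensions, search_radius)
--
--     return neighbors
-- ===== SOURCE B (Python) =====
-- def DFS(graph, visited, position, dimensions, search_radius):
--     ''' Iterative re-implementation: explicit stack of (frame position, live iterator over
--         that position's search window), building one flat result list in discovery order. '''
--
--     def window(pos):
--         return ((x, y)
--                 for x in range(pos[0] - search_radius, pos[0] + search_radius + 1)
--                 for y in range(pos[1] - search_radius, pos[1] + search_radius + 1))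
--
--     result = []
--     stack = [(position, window(position))]
--     while stack:
--         pos, it = stack[-1]
--         step = next(it, None)
--         if step is None:
--             stack.pop()
--             continue
--         x, y = step
--         if 0 <= x <= dimensions and 0 <= y <= dimensions and [x, y] != pos and visited[x][y] is not True:
--             visited[x][y] = True
--             if graph[x][y] == 1:
--                 result.append([x, y])
--                 stack.append(([x, y], window([x, y])))
--     return result
-- ===== Notes on version B (the rewrite author's own statement) =====
-- stated objective: alternative
-- what changed: The recursive DFS that concatenates each child's returned sub-island into its caller's list is replaced by an iterative loop over an explicit stack of (position, live window iterator) frames that appends each discovered point once to a single flat result list.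
-- outside the precondition, e.g. on DFS([[0, 0], [0, 0]], [[False, False], [False, False]], [0, 0], 2, 1): A returns [], B returns []
import Mathlib
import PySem

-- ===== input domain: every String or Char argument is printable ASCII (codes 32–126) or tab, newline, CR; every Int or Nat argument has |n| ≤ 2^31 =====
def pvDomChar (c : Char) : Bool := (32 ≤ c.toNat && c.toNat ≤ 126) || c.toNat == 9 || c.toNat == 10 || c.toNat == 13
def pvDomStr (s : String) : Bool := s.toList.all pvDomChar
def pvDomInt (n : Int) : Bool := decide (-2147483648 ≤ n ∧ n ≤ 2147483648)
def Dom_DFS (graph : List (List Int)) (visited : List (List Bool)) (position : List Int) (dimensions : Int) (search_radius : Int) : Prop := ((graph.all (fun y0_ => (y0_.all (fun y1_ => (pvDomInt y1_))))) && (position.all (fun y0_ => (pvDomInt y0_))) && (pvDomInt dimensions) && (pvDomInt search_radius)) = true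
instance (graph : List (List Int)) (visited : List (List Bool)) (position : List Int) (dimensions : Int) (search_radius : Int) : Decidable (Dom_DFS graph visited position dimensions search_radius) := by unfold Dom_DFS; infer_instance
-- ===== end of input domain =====

-- B replaces A's recursive DFS by an iterative loop over an explicit stack of (position, remaining
-- window cells) frames, appending to one flat result list; equivalence is about the RETURN value
-- (both Pythons mark `visited` in place, and they mark the same cells in the same order).

-- shared cell-level helpers (both Pythons contain these identical guard / window / update lines)
-- window of search positions around (p0, p1): the two nested ranges, flattened in loop order
def pvCells (p0 p1 r : Int) : List (Int × Int) :=
  (PySem.List.pyRange (p0 - r) (p0 + r + 1) 1).flatMap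
    (fun x => (PySem.List.pyRange (p1 - r) (p1 + r + 1) 1).map (fun y => (x, y)))

-- `x in range(dimensions+1) and y in range(dimensions+1) and [x, y] != position and visited[x][y] is not True`
def pvGuard (visited : List (List Bool)) (position : List Int) (dimensions : Int) (x y : Int) : Bool :=
  (decide (0 ≤ x) && decide (x < dimensions + 1)) &&
  (decide (0 ≤ y) && decide (y < dimensions + 1)) &&
  ([x, y] != position) &&
  !((visited.getD x.toNat []).getD y.toNat true)

-- `visited[x][y] = True` (indices are in range whenever the guard passed)
def pvMark (visited : List (List Bool)) (x y : Int) : List (List Bool) :=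
  visited.set x.toNat ((visited.getD x.toNat []).set y.toNat true)

-- `graph[x][y]`
def pvGraphAt (graph : List (List Int)) (x y : Int) : Int :=
  (graph.getD x.toNat []).getD y.toNat 0

def pvTotal (v : List (List Bool)) : Nat := (v.map List.length).sum

-- ===== PORT A =====
-- A's recursion, with a fuel bound on recursion depth (fuel only makes the recursion total;
-- pvTotal visited + 1 always suffices, see lemma dfsA_stable below)
mutual
def dfsA (graph : List (List Int)) (visited : List (List Bool)) (position : List Int)
    (dimensions search_radius : Int) (fuel : Nat) : List (List Int) × List (List Bool) :=
  match fuel with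
  | 0 => ([], visited)
  | f + 1 =>
    goA graph dimensions search_radius f visited position
      (pvCells (position.getD 0 0) (position.getD 1 0) search_radius)
termination_by (fuel, 0)

def goA (graph : List (List Int)) (dimensions search_radius : Int) (f : Nat)
    (visited : List (List Bool)) (position : List Int) :
    List (Int × Int) → List (List Int) × List (List Bool)
  | [] => ([], visited)
  | (x, y) :: rest =>
    if pvGuard visited position dimensions x y then
      let v1 := pvMark visited x y
      if pvGraphAt graph x y == 1 then
        let p := dfsA graph v1 [x, y] dimensions search_radius f
        let q := goA graph dimensions search_radius f p.2 position rest
        ([x, y] :: (p.1 ++ q.1), q.2)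
      else goA graph dimensions search_radius f v1 position rest
    else goA graph dimensions search_radius f visited position rest
termination_by l => (f, l.length + 1)
end

def DFS (graph : List (List Int)) (visited : List (List Bool)) (position : List Int)
    (dimensions : Int) (search_radius : Int) : List (List Int) :=
  (dfsA graph visited position dimensions search_radius (pvTotal visited + 1)).1

-- ===== PORT B =====
-- B's while loop: stack of (frame position, remaining window cells); fuel only bounds the number
-- of loop iterations (the chosen budget always suffices, see lemma loopB_eq below)
def loopB (graph : List (List Int)) (dimensions search_radius : Int) (fuel : Nat)
    (stack : List (List Int × List (Int × Int))) (result : List (List Int))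
    (visited : List (List Bool)) : List (List Int) :=
  match fuel with
  | 0 => result
  | fu + 1 =>
    match stack with
    | [] => result
    | (pos, pend) :: rest =>
      match pend with
      | [] => loopB graph dimensions search_radius fu rest result visited
      | (x, y) :: pend' =>
        if pvGuard visited pos dimensions x y then
          let v1 := pvMark visited x y
          if pvGraphAt graph x y == 1 then
            loopB graph dimensions search_radius fu
              (([x, y], pvCells x y search_radius) :: (pos, pend') :: rest)
              (result ++ [[x, y]]) v1
          else loopB graph dimensions search_radius fu ((pos, pend') :: rest) result v1
        else loopB graph dimensions search_radius fu ((pos, pend') :: rest) result visited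

def DFS_alt (graph : List (List Int)) (visited : List (List Bool)) (position : List Int)
    (dimensions : Int) (search_radius : Int) : List (List Int) :=
  let start := pvCells (position.getD 0 0) (position.getD 1 0) search_radius
  loopB graph dimensions search_radius
    ((pvTotal visited + 1) * (start.length + 1) + start.length + 2)
    [(position, start)] [] visited

-- ===== PRECONDITION & SPEC =====
-- Pre_ excludes the inputs on which the Python A raises IndexError: position too short for the
-- subscripts it takes, or grids not covering the square [0,dimensions]^2 while the search window
-- meets it.  The shape requirement also excludes some inputs where the flood fill happens to stay
-- inside a smaller grid and A returns normally — whether A raises there depends on reachability,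
-- which is not a closed-form condition on the input.
def Pre_DFS (graph : List (List Int)) (visited : List (List Bool)) (position : List Int) (dimensions : Int) (search_radius : Int) : Prop :=
  1 ≤ position.length ∧
  (0 ≤ search_radius →
    (2 ≤ position.length ∧
      (dimensions < 0 ∨
       position.getD 0 0 + search_radius < 0 ∨ dimensions < position.getD 0 0 - search_radius ∨
       position.getD 1 0 + search_radius < 0 ∨ dimensions < position.getD 1 0 - search_radius ∨
       (dimensions.toNat + 1 ≤ graph.length ∧
        graph.all (fun row => dimensions.toNat + 1 ≤ row.length) ∧
        dimensions.toNat + 1 ≤ visited.length ∧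
        visited.all (fun row => dimensions.toNat + 1 ≤ row.length)))))
instance (graph : List (List Int)) (visited : List (List Bool)) (position : List Int) (dimensions : Int) (search_radius : Int) : Decidable (Pre_DFS graph visited position dimensions search_radius) := by unfold Pre_DFS; infer_instance

def pvWitness_DFS : List (List Int) × List (List Bool) × List Int × Int × Int :=
  ([[1, 1], [1, 0]], [[false, false], [false, false]], [0, 0], 1, 1)

def Spec_DFS (graph : List (List Int)) (visited : List (List Bool)) (position : List Int) (dimensions : Int) (search_radius : Int) (out : List (List Int)) : Prop := out = DFS_alt graph visited position dimensions search_radius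
instance (graph : List (List Int)) (visited : List (List Bool)) (position : List Int) (dimensions : Int) (search_radius : Int) (out : List (List Int)) : Decidable (Spec_DFS graph visited position dimensions search_radius out) := by unfold Spec_DFS; infer_instance

-- ===== CLAIM (what is proved, stated in full; the proofs are below) =====
def Claim_equal_DFS : Prop := ∀ (graph : List (List Int)) (visited : List (List Bool)) (position : List Int) (dimensions : Int) (search_radius : Int), Dom_DFS graph visited position dimensions search_radius → Pre_DFS graph visited position dimensions search_radius → Spec_DFS graph visited position dimensions search_radius (DFS graph visited position dimensions search_radius)

-- ===== LEMMAS AND PROOFS =====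

-- number of unmarked cells: the fuel measure
def pvUnmarked (v : List (List Bool)) : Nat := (v.map (fun r => r.count false)).sum

theorem count_false_set_true (l : List Bool) (i : Nat) (h : l.getD i true = false) :
    (l.set i true).count false + 1 = l.count false := by
  induction l generalizing i with
  | nil => simp at h
  | cons b t ih =>
    cases i with
    | zero => simp at h; subst h; simp [List.count_cons]
    | succ j =>
      simp only [List.getD, List.getElem?_cons_succ] at h
      simp only [List.set_cons_succ, List.count_cons]
      have := ih j h
      by_cases hb : b = false <;> simp [hb] <;> omega

theorem unmarked_set (v : List (List Bool)) (i : Nat) (r' : List Bool) (h : i < v.length) :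
    pvUnmarked (v.set i r') + (v.getD i []).count false = pvUnmarked v + r'.count false := by
  induction v generalizing i with
  | nil => simp at h
  | cons row t ih =>
    cases i with
    | zero => simp [pvUnmarked]; omega
    | succ j =>
      simp only [List.set_cons_succ, pvUnmarked, List.map_cons, List.sum_cons, List.getD,
        List.getElem?_cons_succ]
      have := ih j (by simpa using h)
      simp only [pvUnmarked] at this
      simp only [List.getD] at this
      omega

theorem guard_read_false {v : List (List Bool)} {pos : List Int} {d x y : Int}
    (h : pvGuard v pos d x y = true) :
    x.toNat < v.length ∧ (v.getD x.toNat []).getD y.toNat true = false := by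
  simp only [pvGuard, Bool.and_eq_true, Bool.not_eq_true'] at h
  refine ⟨?_, h.2⟩
  by_contra hx
  push_neg at hx
  have : v.getD x.toNat [] = [] := by
    simp [List.getD, List.getElem?_eq_none (by omega)]
  rw [this] at h
  simp [List.getD] at h

theorem unmarked_mark {v : List (List Bool)} {pos : List Int} {d x y : Int}
    (h : pvGuard v pos d x y = true) :
    pvUnmarked (pvMark v x y) + 1 = pvUnmarked v := by
  obtain ⟨hx, hr⟩ := guard_read_false h
  have h1 := count_false_set_true (v.getD x.toNat []) y.toNat hr
  have h2 := unmarked_set v x.toNat ((v.getD x.toNat []).set y.toNat true) hx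
  unfold pvMark
  omega

-- monotonicity: the fold only marks cells, never unmarks
theorem goA_unmarked_le (g : List (List Int)) (d r : Int) :
    ∀ k, ∀ (v : List (List Bool)), pvUnmarked v ≤ k → ∀ (pos : List Int) (l : List (Int × Int)) (f : Nat),
      pvUnmarked (goA g d r f v pos l).2 ≤ pvUnmarked v := by
  intro k
  induction k using Nat.strong_induction_on with
  | _ k ihk =>
    intro v hv pos l f
    induction l generalizing f with
    | nil => simp [goA]
    | cons xy rest ihl =>
      obtain ⟨x, y⟩ := xy
      by_cases hg : pvGuard v pos d x y = true
      · have hm := unmarked_mark hg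
        by_cases h1 : pvGraphAt g x y == 1
        · simp only [goA, hg, if_true, h1, if_true]
          have hv1 : pvUnmarked (pvMark v x y) < k := by omega
          have hchild : pvUnmarked (dfsA g (pvMark v x y) [x, y] d r f).2 ≤ pvUnmarked (pvMark v x y) := by
            cases f with
            | zero => simp [dfsA]
            | succ f' =>
              simp only [dfsA]
              exact ihk _ hv1 _ (le_refl _) _ _ _
          have hrest : pvUnmarked (goA g d r f (dfsA g (pvMark v x y) [x, y] d r f).2 pos rest).2
              ≤ pvUnmarked (dfsA g (pvMark v x y) [x, y] d r f).2 :=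
            ihk _ (by omega) _ (by omega) _ _ _
          omega
        · simp only [goA, hg, if_true, h1, Bool.false_eq_true, if_false]
          have := ihk _ (by omega : pvUnmarked (pvMark v x y) < k) _ (le_refl _) pos rest f
          omega
      · simp only [goA, hg, Bool.false_eq_true, if_false]
        exact ihl f

-- stability: any fuel ≥ the number of unmarked cells computes the same fold
theorem goA_stable (g : List (List Int)) (d r : Int) :
    ∀ k, ∀ (v : List (List Bool)), pvUnmarked v ≤ k →
      ∀ (pos : List Int) (l : List (Int × Int)) (f1 f2 : Nat),
      pvUnmarked v ≤ f1 → pvUnmarked v ≤ f2 →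
      goA g d r f1 v pos l = goA g d r f2 v pos l := by
  intro k
  induction k using Nat.strong_induction_on with
  | _ k ihk =>
    intro v hv pos l f1 f2 hf1 hf2
    induction l generalizing f1 f2 with
    | nil => simp [goA]
    | cons xy rest ihl =>
      obtain ⟨x, y⟩ := xy
      by_cases hg : pvGuard v pos d x y = true
      · have hm := unmarked_mark hg
        set v1 := pvMark v x y with hv1def
        have hv1 : pvUnmarked v1 < k := by omega
        by_cases h1 : pvGraphAt g x y == 1
        · simp only [goA, hg, if_true, h1, if_true]
          obtain ⟨f1', rfl⟩ : ∃ f1', f1 = f1' + 1 := ⟨f1 - 1, by omega⟩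
          obtain ⟨f2', rfl⟩ : ∃ f2', f2 = f2' + 1 := ⟨f2 - 1, by omega⟩
          have hchild : dfsA g v1 [x, y] d r (f1' + 1) = dfsA g v1 [x, y] d r (f2' + 1) := by
            simp only [dfsA]
            exact ihk _ hv1 _ (le_refl _) _ _ _ _ (by omega) (by omega)
          rw [hchild]
          set v2 := (dfsA g v1 [x, y] d r (f2' + 1)).2 with hv2def
          have hv2 : pvUnmarked v2 ≤ pvUnmarked v1 := by
            simp only [hv2def, dfsA]
            exact goA_unmarked_le g d r (pvUnmarked v1) v1 (le_refl _) _ _ _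
          have hrest : goA g d r (f1' + 1) v2 pos rest = goA g d r (f2' + 1) v2 pos rest :=
            ihk _ (by omega) _ (le_refl _) _ _ _ _ (by omega) (by omega)
          rw [hrest]
        · simp only [goA, hg, if_true, h1, Bool.false_eq_true, if_false]
          exact ihk _ hv1 _ (le_refl _) _ _ _ _ (by omega) (by omega)
      · simp only [goA, hg, Bool.false_eq_true, if_false]
        exact ihl f1 f2 hf1 hf2

theorem unmarked_le_total (v : List (List Bool)) : pvUnmarked v ≤ pvTotal v := by
  induction v with
  | nil => simp [pvUnmarked, pvTotal]
  | cons r t ih =>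
    simp only [pvUnmarked, pvTotal, List.map_cons, List.sum_cons] at *
    have := List.count_le_length (l := r) (a := false)
    omega

-- the reference run of B's stack: process each frame with A's fold
def runS (g : List (List Int)) (d r : Int) :
    List (List Bool) → List (List Int × List (Int × Int)) → List (List Int)
  | _, [] => []
  | v, (pos, pend) :: rest =>
    let p := goA g d r (pvUnmarked v) v pos pend
    p.1 ++ runS g d r p.2 rest

-- every pushed frame's window has the same length
theorem cells_length (p0 p1 r : Int) :
    (pvCells p0 p1 r).length = (r + r + 1).toNat * (r + r + 1).toNat := by
  simp only [pvCells, List.length_flatMap, List.length_map, PySem.List.length_pyRange_one]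
  have : ∀ a : Int, (a + r + 1 - (a - r)).toNat = (r + r + 1).toNat := by
    intro a; congr 1; ring
  rw [List.map_congr_left (fun x _ => this p1)]
  simp [List.sum_replicate_nat, this p0, Nat.mul_comm]

def pvMeasure (r : Int) (v : List (List Bool)) (stack : List (List Int × List (Int × Int))) : Nat :=
  (stack.map (fun fr => fr.2.length)).sum + stack.length +
    pvUnmarked v * ((r + r + 1).toNat * (r + r + 1).toNat + 1)

-- the master simulation: enough fuel and B's loop computes the reference run
theorem loopB_eq (g : List (List Int)) (d r : Int) :
    ∀ fuel (v : List (List Bool)) (stack : List (List Int × List (Int × Int))) (res : List (List Int)),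
      pvMeasure r v stack < fuel →
      loopB g d r fuel stack res v = res ++ runS g d r v stack := by
  intro fuel
  induction fuel with
  | zero => intro v stack res h; omega
  | succ fu ih =>
    intro v stack res h
    match stack with
    | [] => simp [loopB, runS]
    | (pos, []) :: rest =>
      simp only [loopB, runS, goA]
      rw [ih v rest res]
      · simp
      · simp only [pvMeasure, List.map_cons, List.sum_cons, List.length_cons] at h ⊢
        omega
    | (pos, (x, y) :: pend') :: rest =>
      simp only [pvMeasure, List.map_cons, List.sum_cons, List.length_cons, List.length_cons] at h
      by_cases hg : pvGuard v pos d x y = true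
      · have hm := unmarked_mark hg
        by_cases h1 : pvGraphAt g x y == 1
        · -- push a new frame
          simp only [loopB, hg, if_true, h1, if_true]
          rw [ih (pvMark v x y) (([x, y], pvCells x y r) :: (pos, pend') :: rest) (res ++ [[x, y]])]
          · -- identify the reference runs
            have hu : pvUnmarked v = pvUnmarked (pvMark v x y) + 1 := by omega
            have hchild :
                goA g d r (pvUnmarked (pvMark v x y)) (pvMark v x y) [x, y] (pvCells x y r)
                  = dfsA g (pvMark v x y) [x, y] d r (pvUnmarked v) := by
              rw [hu]
              simp [dfsA, List.getD]
            have hv2 : pvUnmarked (dfsA g (pvMark v x y) [x, y] d r (pvUnmarked v)).2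
                ≤ pvUnmarked (pvMark v x y) := by
              rw [hu]
              simp only [dfsA]
              exact goA_unmarked_le g d r (pvUnmarked (pvMark v x y)) (pvMark v x y) (le_refl _) _ _ _
            have hstab :
                goA g d r (pvUnmarked (dfsA g (pvMark v x y) [x, y] d r (pvUnmarked v)).2)
                    (dfsA g (pvMark v x y) [x, y] d r (pvUnmarked v)).2 pos pend'
                  = goA g d r (pvUnmarked v)
                    (dfsA g (pvMark v x y) [x, y] d r (pvUnmarked v)).2 pos pend' :=
              goA_stable g d r _ _ (le_refl _) pos pend' _ _ (le_refl _) (by omega)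
            simp only [runS, goA, hg, if_true, h1, if_true, hchild, hstab]
            simp [List.append_assoc]
          · -- fuel accounting: the measure drops by exactly 1 on a push
            have hprod : pvUnmarked v * ((r + r + 1).toNat * (r + r + 1).toNat + 1)
                = pvUnmarked (pvMark v x y) * ((r + r + 1).toNat * (r + r + 1).toNat + 1)
                  + ((r + r + 1).toNat * (r + r + 1).toNat + 1) := by
              rw [← hm]; ring
            simp only [pvMeasure, List.map_cons, List.sum_cons, List.length_cons, cells_length]
            omega
        · -- mark only
          simp only [loopB, hg, if_true, h1, Bool.false_eq_true, if_false]
          rw [ih (pvMark v x y) ((pos, pend') :: rest) res]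
          · have hstab : goA g d r (pvUnmarked (pvMark v x y)) (pvMark v x y) pos pend'
                = goA g d r (pvUnmarked v) (pvMark v x y) pos pend' :=
              goA_stable g d r _ _ (le_refl _) pos pend' _ _ (le_refl _) (by omega)
            simp only [runS, goA, hg, if_true, h1, Bool.false_eq_true, if_false, hstab]
          · have hprod : pvUnmarked v * ((r + r + 1).toNat * (r + r + 1).toNat + 1)
                = pvUnmarked (pvMark v x y) * ((r + r + 1).toNat * (r + r + 1).toNat + 1)
                  + ((r + r + 1).toNat * (r + r + 1).toNat + 1) := by
              rw [← hm]; ring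
            simp only [pvMeasure, List.map_cons, List.sum_cons, List.length_cons]
            omega
      · -- guard fails
        simp only [loopB, hg, Bool.false_eq_true, if_false]
        rw [ih v ((pos, pend') :: rest) res]
        · simp only [runS, goA, hg, Bool.false_eq_true, if_false]
        · simp only [pvMeasure, List.map_cons, List.sum_cons, List.length_cons]
          omega

-- ===== VERDICT (by name: the statement is the Claim_ definition above) =====
theorem DFS_spec : Claim_equal_DFS := by
  intro graph visited position dimensions search_radius _ _
  unfold Spec_DFS DFS DFS_alt
  set start := pvCells (position.getD 0 0) (position.getD 1 0) search_radius with hstart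
  have hlen : start.length = (search_radius + search_radius + 1).toNat * (search_radius + search_radius + 1).toNat :=
    cells_length _ _ _
  rw [loopB_eq]
  · simp only [runS, List.nil_append, List.append_nil, dfsA]
    have := goA_stable graph dimensions search_radius (pvUnmarked visited) visited (le_refl _)
      position start (pvTotal visited) (pvUnmarked visited)
      (unmarked_le_total visited) (le_refl _)
    rw [this]
  · have h1 := unmarked_le_total visited
    simp only [pvMeasure, List.map_cons, List.sum_cons, List.map_nil, List.sum_nil,
      List.length_cons, List.length_nil, hlen]
    nlinarith [unmarked_le_total visited]
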